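-- pv_equiv track=rewrite | github.com/TiagodePAlves/MC346-prolog | utils/format.py | to_prolog_lines
-- ===== SOURCE A (Python) =====
-- from typing import (
--     Iterable, Iterator, TypeVar, Optional,
--     Callable, Union, TextIO, Tuple, List
-- )
--
-- T = TypeVar('T')
--
-- def take_and_peek(iterable: Iterable[T]) -> Iterator[Tuple[T, Optional[T]]]:
--     iterator = iter(iterable)
--     try:
--         this = next(iterator)
--     except StopIteration:
--         return
--
--     for val in iterator:
--         yield this, val
--         this = val
--     yield this, None
--
-- def to_prolog_lines(iterable: Iterable[T], indent: int=4) -> Iterator[str]: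
--     space = " " * indent
--
--     yield '['
--     for val, next_val in take_and_peek(iterable):
--         val_str = space + str(val)
--         if next_val is not None:
--             val_str += ','
--         yield val_str
--     yield '].'
-- ===== SOURCE B (Python) =====
-- def to_prolog_lines(iterable, indent=4):
--     space = " " * indent
--     items = list(iterable)
--     last = len(items) - 1
--     yield '['
--     for i, val in enumerate(items):
--         yield space + str(val) + (',' if i < last else '')
--     yield '].'
-- ===== Notes on version B (the rewrite author's own statement) =====
-- stated objective: simpler
-- what changed: Materializes the iterable once and appends the comma by comparing the enumerate index with the last index, removing the take_and_peek one-element-lookahead helper entirely.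
import Mathlib
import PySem

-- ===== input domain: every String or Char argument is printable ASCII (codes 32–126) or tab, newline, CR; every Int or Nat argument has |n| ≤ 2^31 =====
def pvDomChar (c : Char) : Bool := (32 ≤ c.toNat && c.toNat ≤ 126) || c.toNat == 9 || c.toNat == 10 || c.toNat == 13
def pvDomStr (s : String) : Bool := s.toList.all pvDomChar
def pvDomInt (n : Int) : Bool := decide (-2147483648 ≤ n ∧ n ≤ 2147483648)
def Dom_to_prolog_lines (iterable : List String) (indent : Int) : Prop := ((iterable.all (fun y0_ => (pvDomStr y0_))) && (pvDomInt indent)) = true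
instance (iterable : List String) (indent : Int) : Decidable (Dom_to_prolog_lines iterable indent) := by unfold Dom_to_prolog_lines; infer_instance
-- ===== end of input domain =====

-- B replaces A's take_and_peek one-element lookahead with a materialized list and a
-- last-index comparison (simpler decomposition; same O(n) cost). Return value only: both are generators in Python.

-- ===== PORT A =====
-- helper take_and_peek: pairs each element with the following one (none at the end)
def tapLoop (this : String) (rest : List String) : List (String × Option String) :=
  match rest with
  | [] => [(this, none)]
  | v :: t => (this, some v) :: tapLoop v t

def take_and_peek (l : List String) : List (String × Option String) :=
  match l with
  | [] => []
  | h :: t => tapLoop h t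

def to_prolog_lines (iterable : List String) (indent : Int) : List String :=
  let space := String.ofList (List.replicate indent.toNat ' ')   -- " " * indent ("" for indent ≤ 0, as in Python)
  ["["] ++ (take_and_peek iterable).map (fun p =>
      let val_str := space ++ p.1
      match p.2 with
      | some _ => val_str ++ ","
      | none => val_str) ++ ["]."]

-- ===== PORT B =====
def to_prolog_lines_alt (iterable : List String) (indent : Int) : List String :=
  let space := String.ofList (List.replicate indent.toNat ' ')
  let items := iterable
  let last : Int := (items.length : Int) - 1
  ["["] ++ (PySem.List.enumerate items).map (fun p =>
      space ++ p.2 ++ (if p.1 < last then "," else "")) ++ ["]."]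

-- ===== PRECONDITION & SPEC =====
def Spec_to_prolog_lines (iterable : List String) (indent : Int) (out : List String) : Prop := out = to_prolog_lines_alt iterable indent
instance (iterable : List String) (indent : Int) (out : List String) : Decidable (Spec_to_prolog_lines iterable indent out) := by unfold Spec_to_prolog_lines; infer_instance

-- ===== CLAIM (what is proved, stated in full; the proofs are below) =====
def Claim_equal_to_prolog_lines : Prop := ∀ (iterable : List String) (indent : Int), Dom_to_prolog_lines iterable indent → Spec_to_prolog_lines iterable indent (to_prolog_lines iterable indent)

-- ===== LEMMAS AND PROOFS =====

lemma tap_enum (h : String) (t : List String) (s : Int) (space : String) :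
    (tapLoop h t).map (fun p =>
      match p.2 with
      | some _ => space ++ p.1 ++ ","
      | none => space ++ p.1)
    = (PySem.List.enumerate (h :: t) s).map (fun p =>
      space ++ p.2 ++ (if p.1 < s + ((h :: t).length : Int) - 1 then "," else "")) := by
  induction t generalizing h s with
  | nil =>
      simp [tapLoop, PySem.List.enumerate]
  | cons v t' ih =>
      have hlen : s + 1 + ((v :: t').length : Int) - 1 = s + ((h :: v :: t').length : Int) - 1 := by
        simp only [List.length_cons]; push_cast; omega
      have hcond : s < s + ((h :: v :: t').length : Int) - 1 := by
        simp only [List.length_cons]; push_cast; omega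
      simp only [tapLoop, List.map_cons]
      rw [ih v (s + 1), hlen]
      simp [PySem.List.enumerate_cons]

-- ===== VERDICT (by name: the statement is the Claim_ definition above) =====
theorem to_prolog_lines_spec : Claim_equal_to_prolog_lines := by
  intro iterable indent _
  unfold Spec_to_prolog_lines to_prolog_lines to_prolog_lines_alt take_and_peek
  cases iterable with
  | nil => simp [PySem.List.enumerate]
  | cons h t =>
    have key := tap_enum h t 0 (String.ofList (List.replicate indent.toNat ' '))
    simp only [zero_add] at key
    simpa using congrArg (fun l => l ++ (["]."] : List String)) key
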